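-- pv_equiv track=rewrite | github.com/pkhetland/Scientific-Python-exercises | Exercises/ex01_clock_patience/ex_01_sim.py | play_one_round
-- ===== SOURCE A (Python) =====
-- def play_one_round(cards, board):
--     """Play a single round of clock patience.
--     For each position, check if that position is locked,
--     If it is locked, skip that position (continue),
--     Otherwise deal a card.
--     """
--     for position, board_state in enumerate(board):
--         if board_state[1] == position + 1:
--             continue
--         elif len(cards) == 0:
--             break
--
--         board[position] = cards.pop()
--     return cards, board
-- ===== SOURCE B (Python) =====
-- def play_one_round(cards, board):
--     """Closed-form bulk deal: count the unlocked positions, split the deck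
--     once with a slice (the last k cards, reversed, are the ones dealt),
--     then rebuild the board in one pass consuming that dealt list.
--     Mutates cards and board in place like the original."""
--     unlocked_total = sum(1 for p, st in enumerate(board) if st[1] != p + 1)
--     k = min(len(cards), unlocked_total)
--     dealt = cards[len(cards) - k:][::-1]
--     del cards[len(cards) - k:]
--     new_board = []
--     i = 0
--     for p, st in enumerate(board):
--         if i < k and st[1] != p + 1:
--             new_board.append(dealt[i])
--             i += 1
--         else:
--             new_board.append(st)
--     board[:] = new_board
--     return cards, board
-- ===== Notes on version B (the rewrite author's own statement) =====
-- stated objective: alternative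
-- what changed: A's single loop that pops one card per unlocked position is replaced by a closed-form bulk deal: count the unlocked positions, cut the deck once with a slice (the last k cards, reversed, are the dealt ones), then rebuild the board in one pass consuming that dealt list.
import Mathlib
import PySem

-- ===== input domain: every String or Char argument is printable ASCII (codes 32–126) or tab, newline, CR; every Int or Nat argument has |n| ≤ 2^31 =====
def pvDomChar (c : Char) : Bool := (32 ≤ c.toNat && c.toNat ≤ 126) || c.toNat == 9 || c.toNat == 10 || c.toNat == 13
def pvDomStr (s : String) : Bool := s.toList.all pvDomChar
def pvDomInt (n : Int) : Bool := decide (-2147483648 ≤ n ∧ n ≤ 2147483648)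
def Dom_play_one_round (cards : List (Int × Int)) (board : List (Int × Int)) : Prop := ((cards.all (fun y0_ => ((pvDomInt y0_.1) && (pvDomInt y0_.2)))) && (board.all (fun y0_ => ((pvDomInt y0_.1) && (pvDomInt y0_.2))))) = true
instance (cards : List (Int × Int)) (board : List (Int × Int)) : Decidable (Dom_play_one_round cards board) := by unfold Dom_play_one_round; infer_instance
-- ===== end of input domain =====

-- B replaces A's per-card pop loop by a closed-form bulk deal: count the unlocked positions,
-- split the deck once with a slice, rebuild the board in one pass consuming the dealt list (alternative decomposition; same cost).
-- Both Pythons mutate `cards` and `board` in place identically; the theorems below are about the returned pair.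

-- ===== PORT A =====
-- one loop over enumerate(board): locked → continue, deck empty → break, else board[position] = cards.pop()
def playA_go (cards : List (Int × Int)) (rest : List (Int × Int)) (pos : Int) : (List (Int × Int)) × (List (Int × Int)) :=
  match rest with
  | [] => (cards, [])
  | b :: bs =>
    if b.2 == pos + 1 then
      let r := playA_go cards bs (pos + 1)
      (r.1, b :: r.2)
    else if cards.length == 0 then
      (cards, b :: bs)
    else
      match PySem.List.pop? cards (-1) with   -- cards.pop(); guarded above, so never none
      | some (c, cards') =>
        let r := playA_go cards' bs (pos + 1)
        (r.1, c :: r.2)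
      | none => (cards, b :: bs)

def play_one_round (cards : List (Int × Int)) (board : List (Int × Int)) : (List (Int × Int)) × (List (Int × Int)) :=
  playA_go cards board 0

-- ===== PORT B =====
-- unlocked_total = sum(1 for p, st in enumerate(board) if st[1] != p + 1)
def countUnlockedB (board : List (Int × Int)) (pos : Int) : Nat :=
  match board with
  | [] => 0
  | b :: bs => (if b.2 ≠ pos + 1 then 1 else 0) + countUnlockedB bs (pos + 1)

-- the rebuilding pass; Python's `i < k` test is `dealt not yet exhausted` since len(dealt) = k,
-- so the port carries the remaining dealt suffix instead of the counter i
def rebuildB (board : List (Int × Int)) (dealt : List (Int × Int)) (pos : Int) : List (Int × Int) :=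
  match board with
  | [] => []
  | b :: bs =>
    if b.2 ≠ pos + 1 then
      match dealt with
      | d :: ds => d :: rebuildB bs ds (pos + 1)
      | [] => b :: rebuildB bs [] (pos + 1)
    else b :: rebuildB bs dealt (pos + 1)

def play_one_round_alt (cards : List (Int × Int)) (board : List (Int × Int)) : (List (Int × Int)) × (List (Int × Int)) :=
  let k := min cards.length (countUnlockedB board 0)
  let dealt := (cards.drop (cards.length - k)).reverse    -- cards[len-k:][::-1]
  let cards' := cards.take (cards.length - k)             -- del cards[len-k:]
  (cards', rebuildB board dealt 0)

-- ===== PRECONDITION & SPEC =====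
def Spec_play_one_round (cards : List (Int × Int)) (board : List (Int × Int)) (out : (List (Int × Int)) × (List (Int × Int))) : Prop := out = play_one_round_alt cards board
instance (cards : List (Int × Int)) (board : List (Int × Int)) (out : (List (Int × Int)) × (List (Int × Int))) : Decidable (Spec_play_one_round cards board out) := by unfold Spec_play_one_round; infer_instance

-- ===== CLAIM (what is proved, stated in full; the proofs are below) =====
def Claim_equal_play_one_round : Prop := ∀ (cards : List (Int × Int)) (board : List (Int × Int)), Dom_play_one_round cards board → Spec_play_one_round cards board (play_one_round cards board)

-- ===== LEMMAS AND PROOFS =====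

-- rebuilding with no cards to deal leaves the board unchanged
theorem rebuildB_nil (board : List (Int × Int)) : ∀ pos, rebuildB board [] pos = board := by
  induction board with
  | nil => intro pos; simp [rebuildB]
  | cons b bs ih => intro pos; simp [rebuildB, ih]

-- A's interleaved single pass equals B's closed-form split-and-rebuild, at any start position
theorem playA_eq_rebuild (rest : List (Int × Int)) : ∀ (cards : List (Int × Int)) (pos : Int),
    playA_go cards rest pos
      = (cards.take (cards.length - min cards.length (countUnlockedB rest pos)),
         rebuildB rest ((cards.drop (cards.length - min cards.length (countUnlockedB rest pos))).reverse) pos) := by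
  induction rest with
  | nil =>
    intro cards pos
    simp [playA_go, countUnlockedB, rebuildB]
  | cons b bs ih =>
    intro cards pos
    by_cases hlock : b.2 = pos + 1
    · simp [playA_go, countUnlockedB, hlock, ih cards (pos + 1), rebuildB]
    · rcases eq_or_ne cards [] with hc | hc
      · subst hc
        simp [playA_go, countUnlockedB, hlock, rebuildB, rebuildB_nil]
      · -- cards nonempty: pop last card
        rcases (List.eq_nil_or_concat cards).resolve_left hc with ⟨init, last, rfl⟩
        simp only [List.concat_eq_append]
        have hpop : PySem.List.pop? (init ++ [last]) (-1) = some (last, init) :=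
          PySem.List.pop?_last ..
        have hlen : (init ++ [last]).length = init.length + 1 := by simp
        have h0 : ¬ (init ++ [last]).length = 0 := by simp
        simp only [playA_go, beq_iff_eq, if_neg hlock, if_neg h0, hpop]
        rw [ih init (pos + 1)]
        -- arithmetic: k = min (n+1) (1+u) = 1 + min n u, with n = init.length, u = count bs (pos+1)
        set n := init.length with hn
        set u := countUnlockedB bs (pos + 1) with hu
        have hcount : countUnlockedB (b :: bs) pos = 1 + u := by
          simp [countUnlockedB, hlock, hu]
        have hk : min (n + 1) (1 + u) = (min n u) + 1 := by omega
        have hidx : n + 1 - min (n + 1) (1 + u) = n - min n u := by omega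
        have hle : n - min n u ≤ n := by omega
        have htake : (init ++ [last]).take (n - min n u) = init.take (n - min n u) := by
          rw [List.take_append_of_le_length hle]
        have hdrop : (init ++ [last]).drop (n - min n u) = init.drop (n - min n u) ++ [last] := by
          rw [List.drop_append_of_le_length hle]
        have hidx2 : n + 1 - (min n u + 1) = n - min n u := by omega
        rw [hcount, hlen, hk, hidx2, htake, hdrop, List.reverse_append,
          List.reverse_singleton, List.singleton_append]
        simp only [rebuildB]
        rw [if_pos hlock]

-- ===== VERDICT (by name: the statement is the Claim_ definition above) =====
theorem play_one_round_spec : Claim_equal_play_one_round := by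
  intro cards board _
  unfold Spec_play_one_round play_one_round play_one_round_alt
  exact playA_eq_rebuild board cards 0
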